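-- pv_equiv track=rewrite | github.com/OghenefegaOmajene/Python-Tasks | maxDifference.py | maxDifferenceSubarray
-- ===== SOURCE A (Python) =====
-- def maxDifferenceSubarray(arr):
--     """
--     Find maximum difference considering all possible subarrays.
--     Returns max difference between any two elements in any subarray.
--
--     Args:
--         arr (list): List of numbers
--
--     Returns:
--         int/float: Maximum difference in any subarray
--     """
--     if len(arr) < 2:
--         return 0
--
--     global_max_diff = float('-inf')
--
--     for i in range(len(arr)):
--         min_in_subarray = arr[i]
--         max_in_subarray = arr[i]
--
--         for j in range(i + 1, len(arr)):
--             min_in_subarray = min(min_in_subarray, arr[j])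
--             max_in_subarray = max(max_in_subarray, arr[j])
--
--             current_diff = max_in_subarray - min_in_subarray
--             global_max_diff = max(global_max_diff, current_diff)
--
--     return global_max_diff
-- ===== SOURCE B (Python) =====
-- def maxDifferenceSubarray(arr):
--     """Single linear pass: the maximizing subarray is the whole array,
--     so the answer is (global max) - (global min)."""
--     if len(arr) < 2:
--         return 0
--     lo = arr[0]
--     hi = arr[0]
--     for x in arr[1:]:
--         if x < lo:
--             lo = x
--         if x > hi:
--             hi = x
--     return hi - lo
-- ===== Notes on version B (the rewrite author's own statement) =====
-- stated objective: faster
-- what changed: Replaced the nested all-starts/all-extensions scan with one linear pass that maintains the running minimum and maximum and returns their difference, since the full array is always a maximizing subarray.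
import Mathlib
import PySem

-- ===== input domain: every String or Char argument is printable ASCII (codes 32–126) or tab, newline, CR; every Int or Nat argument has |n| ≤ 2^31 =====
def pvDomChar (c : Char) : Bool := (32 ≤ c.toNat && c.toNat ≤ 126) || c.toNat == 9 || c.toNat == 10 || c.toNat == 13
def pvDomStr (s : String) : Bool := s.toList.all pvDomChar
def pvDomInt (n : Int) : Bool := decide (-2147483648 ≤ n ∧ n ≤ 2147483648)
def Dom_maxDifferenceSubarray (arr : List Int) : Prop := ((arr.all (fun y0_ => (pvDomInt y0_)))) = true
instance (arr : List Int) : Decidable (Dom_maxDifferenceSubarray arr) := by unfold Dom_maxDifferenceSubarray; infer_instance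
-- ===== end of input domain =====

-- B replaces A's O(n^2) nested subarray scan with one linear pass tracking the running
-- min and max and returning their difference (the full array is a maximizing subarray).


-- ===== PORT A =====
-- global_max_diff starts at float('-inf'): modelled as Option Int (none = -inf),
-- pvOptMax g d = max(g, d) with that convention.
def pvOptMax (g : Option Int) (d : Int) : Int :=
  match g with
  | none => d
  | some v => max v d

-- inner loop 'for j in range(i+1, len(arr))' over the tail after position i;
-- state (min_in_subarray, max_in_subarray, global_max_diff)
def pvAInner : List Int → Int × Int × Option Int → Int × Int × Option Int
  | [], st => st
  | a :: t, (mn, mx, g) =>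
      let mn' := min mn a
      let mx' := max mx a
      let d := mx' - mn'
      pvAInner t (mn', mx', some (pvOptMax g d))

-- outer loop 'for i in range(len(arr))': at step i the head is arr[i], the tail is arr[i+1:]
def pvAOuter : List Int → Option Int → Option Int
  | [], g => g
  | a :: t, g => pvAOuter t (pvAInner t (a, a, g)).2.2

def maxDifferenceSubarray (arr : List Int) : Int :=
  if arr.length < 2 then 0
  else (pvAOuter arr none).getD 0  -- none is unreachable here: len ≥ 2 ⇒ the inner loop runs

-- ===== PORT B =====
-- single pass: running lo/hi over arr[1:]
def pvBLoop : List Int → Int × Int → Int × Int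
  | [], p => p
  | y :: t, (lo, hi) =>
      pvBLoop t (if y < lo then y else lo, if hi < y then y else hi)

def maxDifferenceSubarray_alt (arr : List Int) : Int :=
  if arr.length < 2 then 0
  else
    match arr with
    | [] => 0  -- unreachable: len ≥ 2
    | x :: xs =>
        let p := pvBLoop xs (x, x)
        p.2 - p.1

-- ===== PRECONDITION & SPEC =====
def Spec_maxDifferenceSubarray (arr : List Int) (out : Int) : Prop := out = maxDifferenceSubarray_alt arr
instance (arr : List Int) (out : Int) : Decidable (Spec_maxDifferenceSubarray arr out) := by unfold Spec_maxDifferenceSubarray; infer_instance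

-- ===== CLAIM (what is proved, stated in full; the proofs are below) =====
def Claim_equal_maxDifferenceSubarray : Prop := ∀ (arr : List Int), Dom_maxDifferenceSubarray arr → Spec_maxDifferenceSubarray arr (maxDifferenceSubarray arr)

-- ===== LEMMAS AND PROOFS =====

theorem pvBLoop_eq (l : List Int) : ∀ lo hi : Int,
    pvBLoop l (lo, hi) = (l.foldl min lo, l.foldl max hi) := by
  induction l with
  | nil => intro lo hi; rfl
  | cons y t ih =>
      intro lo hi
      have hmin : (if y < lo then y else lo) = min lo y := by rw [min_def]; split_ifs <;> omega
      have hmax : (if hi < y then y else hi) = max hi y := by rw [max_def]; split_ifs <;> omega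
      simp only [pvBLoop, hmin, hmax, ih, List.foldl_cons]

theorem foldl_max_le (l : List Int) (a c : Int) (ha : a ≤ c) (hl : ∀ y ∈ l, y ≤ c) :
    l.foldl max a ≤ c := by
  rcases PySem.List.foldl_max_mem l a with h | h
  · omega
  · exact hl _ h

theorem le_foldl_min (l : List Int) (a c : Int) (ha : c ≤ a) (hl : ∀ y ∈ l, c ≤ y) :
    c ≤ l.foldl min a := by
  rcases PySem.List.foldl_min_mem l a with h | h
  · omega
  · exact hl _ h

theorem pvAInner_g (l : List Int) (hl : l ≠ []) : ∀ (mn mx : Int) (g : Option Int),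
    (pvAInner l (mn, mx, g)).2.2 = some (pvOptMax g (l.foldl max mx - l.foldl min mn)) := by
  induction l with
  | nil => exact absurd rfl hl
  | cons a t ih =>
      intro mn mx g
      by_cases ht : t = []
      · subst ht; rfl
      · simp only [pvAInner, ih ht, List.foldl_cons]
        congr 1
        have h1 : min mn a ≤ mn := min_le_left _ _
        have h2 : mx ≤ max mx a := le_max_left _ _
        have h3 : t.foldl min (min mn a) ≤ min mn a := (PySem.List.foldl_min_le t _).1
        have h4 : max mx a ≤ t.foldl max (max mx a) := (PySem.List.le_foldl_max t _).1
        cases g <;> simp [pvOptMax] <;> omega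

-- once global_max_diff already holds mx - mn bounding every remaining element,
-- the remaining outer iterations leave it unchanged
theorem pvAOuter_absorb (l : List Int) : ∀ mn mx : Int,
    (∀ y ∈ l, mn ≤ y ∧ y ≤ mx) → pvAOuter l (some (mx - mn)) = some (mx - mn) := by
  induction l with
  | nil => intro _ _ _; rfl
  | cons a t ih =>
      intro mn mx hb
      by_cases ht : t = []
      · subst ht; rfl
      · have hbt : ∀ y ∈ t, mn ≤ y ∧ y ≤ mx := fun y hy => hb y (List.mem_cons_of_mem a hy)
        have hba := hb a (List.mem_cons_self ..)
        have hmax : t.foldl max a ≤ mx := foldl_max_le t a mx hba.2 (fun y hy => (hbt y hy).2)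
        have hmin : mn ≤ t.foldl min a := le_foldl_min t a mn hba.1 (fun y hy => (hbt y hy).1)
        simp only [pvAOuter, pvAInner_g t ht]
        have : pvOptMax (some (mx - mn)) (t.foldl max a - t.foldl min a) = mx - mn := by
          simp [pvOptMax]; omega
        rw [this]; exact ih mn mx hbt

-- ===== VERDICT (by name: the statement is the Claim_ definition above) =====
theorem maxDifferenceSubarray_spec : Claim_equal_maxDifferenceSubarray := by
  intro arr _
  unfold Spec_maxDifferenceSubarray maxDifferenceSubarray maxDifferenceSubarray_alt
  by_cases hlen : arr.length < 2
  · simp [hlen]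
  · simp only [hlen, if_false]
    match arr, hlen with
    | [], h => simp at h
    | [_], h => simp at h
    | x :: b :: rest, _ =>
      have hxs : (b :: rest) ≠ [] := by simp
      have hstep : pvAOuter (x :: b :: rest) none
          = pvAOuter (b :: rest) (pvAInner (b :: rest) (x, x, none)).2.2 := rfl
      rw [hstep, pvAInner_g (b :: rest) hxs]
      simp only [pvOptMax]
      rw [pvAOuter_absorb (b :: rest) ((b :: rest).foldl min x) ((b :: rest).foldl max x)
        (fun y hy => ⟨(PySem.List.foldl_min_le (b :: rest) x).2 y hy,
                      (PySem.List.le_foldl_max (b :: rest) x).2 y hy⟩)]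
      rw [pvBLoop_eq]; rfl
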